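-- pv_equiv track=rewrite | github.com/ovieimara/datastructures-algorithms | subs.py | subStringWithVowels
-- ===== SOURCE A (Python) =====
-- def countVowels(sub):
--     count = 0
--     for c in sub:
--         if c in {'a', 'e', 'i', 'o', 'u'}:
--             count += 1
--     return count
--
-- def subStringWithVowels(s):
--     size = len(s)
--     # count = 0
--     vowels = {'a', 'e', 'i', 'o', 'u'}
--     max_count = 0
--
--     for l in range(1, size+1):
--         count = countVowels(s[: l])
--         max_count = max(max_count, count)
--
--         for i in range(1, size-l):
--             removed = s[i-1]
--             entered = s[i+l-1]
--             if removed in vowels: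
--                 count -= 1
--             if entered in vowels:
--                 count += 1
--
--             max_count = max(max_count, count)
--
--     return max_count
-- ===== SOURCE B (Python) =====
-- def subStringWithVowels(s):
--     # The whole string is itself a substring, so the maximum vowel count over
--     # all substrings is just the total number of vowels: one pass.
--     return sum(1 for c in s if c in 'aeiou')
-- ===== Notes on version B (the rewrite author's own statement) =====
-- stated objective: faster
-- what changed: Replaced the quadratic loop over all window lengths with a single pass counting all vowels: the maximum over windows is attained by the whole string, so it equals the total vowel count.
import Mathlib
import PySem

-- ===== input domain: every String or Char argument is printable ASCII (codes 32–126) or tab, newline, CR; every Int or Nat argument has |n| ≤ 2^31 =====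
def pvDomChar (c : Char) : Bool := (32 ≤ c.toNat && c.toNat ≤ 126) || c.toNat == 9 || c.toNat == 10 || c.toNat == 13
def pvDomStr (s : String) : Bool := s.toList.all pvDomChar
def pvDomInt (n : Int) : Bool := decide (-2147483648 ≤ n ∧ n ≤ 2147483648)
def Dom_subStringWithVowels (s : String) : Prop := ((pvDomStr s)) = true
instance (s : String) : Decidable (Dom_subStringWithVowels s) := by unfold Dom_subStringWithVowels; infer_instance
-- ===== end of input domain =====

-- B replaces A's quadratic scan over all window lengths by one pass counting all vowels
-- (the maximum over windows is attained by the whole string): asymptotically faster.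

-- ===== PORT A =====
-- 'c in {'a','e','i','o','u'}' as an explicit disjunction
def pvIsVowel (c : Char) : Bool := c == 'a' || c == 'e' || c == 'i' || c == 'o' || c == 'u'

def countVowels (sub : List Char) : Int :=
  sub.foldl (fun count c => if pvIsVowel c then count + 1 else count) 0

def subStringWithVowels (s : String) : Int :=
  let cs := s.toList
  let size : Int := cs.length
  (PySem.List.pyRange 1 (size + 1) 1).foldl (fun max_count l =>
    let count := countVowels (PySem.List.slice cs none (some l))
    let max_count := max max_count count
    let st := (PySem.List.pyRange 1 (size - l) 1).foldl (fun (st : Int × Int) i =>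
      -- indices i-1 and i+l-1 are always in range here, so the getD default is unreachable
      let removed := PySem.List.pyGetD cs (i - 1) ' '
      let entered := PySem.List.pyGetD cs (i + l - 1) ' '
      let count := if pvIsVowel removed then st.1 - 1 else st.1
      let count := if pvIsVowel entered then count + 1 else count
      (count, max st.2 count)) (count, max_count)
    st.2) 0

-- ===== PORT B =====
def subStringWithVowels_alt (s : String) : Int :=
  ((s.toList.filter (fun c => ("aeiou".toList).contains c)).length : Int)

-- ===== PRECONDITION & SPEC =====
def Spec_subStringWithVowels (s : String) (out : Int) : Prop := out = subStringWithVowels_alt s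
instance (s : String) (out : Int) : Decidable (Spec_subStringWithVowels s out) := by unfold Spec_subStringWithVowels; infer_instance

-- ===== CLAIM (what is proved, stated in full; the proofs are below) =====
def Claim_equal_subStringWithVowels : Prop := ∀ (s : String), Dom_subStringWithVowels s → Spec_subStringWithVowels s (subStringWithVowels s)

-- proof-side names for the pieces of port A (definitionally equal to the port's body)
def pvInnerA (cs : List Char) (l : Int) (st : Int × Int) : Int × Int :=
  (PySem.List.pyRange 1 ((cs.length : Int) - l) 1).foldl (fun (st : Int × Int) i =>
    let removed := PySem.List.pyGetD cs (i - 1) ' '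
    let entered := PySem.List.pyGetD cs (i + l - 1) ' '
    let count := if pvIsVowel removed then st.1 - 1 else st.1
    let count := if pvIsVowel entered then count + 1 else count
    (count, max st.2 count)) st

def pvF (cs : List Char) (max_count : Int) (l : Int) : Int :=
  let count := countVowels (PySem.List.slice cs none (some l))
  let max_count := max max_count count
  (pvInnerA cs l (count, max_count)).2

theorem pvA_eq_foldF (s : String) :
    subStringWithVowels s
      = (PySem.List.pyRange 1 ((s.toList.length : Int) + 1) 1).foldl (pvF s.toList) 0 := rfl

-- ===== LEMMAS AND PROOFS =====

-- total vowel count as a Nat-countP, the reference quantity of the proof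
def pvVC (cs : List Char) : Int := (cs.countP pvIsVowel : Int)

theorem pvCountVowels_acc (cs : List Char) : ∀ a : Int,
    cs.foldl (fun count c => if pvIsVowel c then count + 1 else count) a = a + pvVC cs := by
  induction cs with
  | nil => intro a; simp [pvVC]
  | cons c t ih =>
    intro a
    simp only [List.foldl_cons, ih, pvVC, List.countP_cons]
    by_cases h : pvIsVowel c <;> simp [h] <;> omega

theorem pvCountVowels_eq (cs : List Char) : countVowels cs = pvVC cs := by
  simpa using pvCountVowels_acc cs 0

theorem pvVC_le (cs : List Char) (j l : ℕ) : pvVC ((cs.drop j).take l) ≤ pvVC cs := by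
  have h : ((cs.drop j).take l).Sublist cs :=
    (List.take_sublist _ _).trans (List.drop_sublist _ _)
  simpa [pvVC] using Int.ofNat_le.mpr h.countP_le

theorem pvVC_nonneg (cs : List Char) : 0 ≤ pvVC cs := by
  simp [pvVC]

-- the arithmetic of one remove/enter update
theorem pvIfArith (A B : Bool) (c : Int) :
    (if B = true then (if A = true then c - 1 else c) + 1 else (if A = true then c - 1 else c))
      = c - (if A = true then 1 else 0) + (if B = true then 1 else 0) := by
  cases A <;> cases B <;> simp

-- sliding-window step: removing cs[k] and adding cs[k+l] turns window k into window k+1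
theorem pvWindow_step (cs : List Char) (m k : ℕ) (hk : k + (m + 1) < cs.length) :
    pvVC ((cs.drop (k+1)).take (m+1)) =
      pvVC ((cs.drop k).take (m+1))
        - (if pvIsVowel (cs.getD k ' ') then 1 else 0)
        + (if pvIsVowel (cs.getD (k + (m+1)) ' ') then 1 else 0) := by
  have hklt : k < cs.length := by omega
  have hd : cs.drop k = cs[k] :: cs.drop (k+1) := List.drop_eq_getElem_cons hklt
  have h1 : (cs.drop k).take (m+1) = cs[k] :: (cs.drop (k+1)).take m := by
    rw [hd]; rfl
  have hget : (cs.drop (k+1))[m]? = some cs[k + (m+1)] := by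
    have h' : k + 1 + m = k + (m+1) := by omega
    rw [List.getElem?_drop, h']
    exact List.getElem?_eq_getElem (by omega)
  have h2 : (cs.drop (k+1)).take (m+1) = (cs.drop (k+1)).take m ++ [cs[k + (m+1)]] := by
    rw [List.take_add_one, hget]; rfl
  have hg1 : cs.getD k ' ' = cs[k] := List.getD_eq_getElem cs ' ' hklt
  have hg2 : cs.getD (k + (m+1)) ' ' = cs[k + (m+1)] := List.getD_eq_getElem cs ' ' hk
  rw [h1, h2, hg1, hg2]
  simp only [pvVC, List.countP_cons, List.countP_append]
  by_cases ha : pvIsVowel cs[k] <;> by_cases hb : pvIsVowel cs[k + (m+1)] <;>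
    simp [ha, hb]

-- the inner fold, rephrased over Nat indices
def pvG (cs : List Char) (l : ℕ) (st : Int × Int) (k : ℕ) : Int × Int :=
  let c1 := if pvIsVowel (cs.getD k ' ') then st.1 - 1 else st.1
  let c2 := if pvIsVowel (cs.getD (k + l) ' ') then c1 + 1 else c1
  (c2, max st.2 c2)

-- invariant of the inner loop: the count is the vowel count of the current window,
-- and the running maximum never exceeds the total vowel count
theorem pvInner (cs : List Char) (m : ℕ) :
    ∀ (N : ℕ), N + (m+1) ≤ cs.length → ∀ (mx : Int), mx ≤ pvVC cs →
      ((List.range N).foldl (pvG cs (m+1)) (pvVC (cs.take (m+1)), mx)).1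
          = pvVC ((cs.drop N).take (m+1))
      ∧ ((List.range N).foldl (pvG cs (m+1)) (pvVC (cs.take (m+1)), mx)).2 ≤ pvVC cs := by
  intro N
  induction N with
  | zero => intro _ mx hmx; exact ⟨by simp, by simpa using hmx⟩
  | succ N ih =>
    intro hN mx hmx
    obtain ⟨ih1, ih2⟩ := ih (by omega) mx hmx
    set st := (List.range N).foldl (pvG cs (m+1)) (pvVC (cs.take (m+1)), mx) with hst
    have hpair : st = (pvVC ((cs.drop N).take (m+1)), st.2) := by rw [← ih1]
    rw [List.range_succ, List.foldl_append, List.foldl_cons, List.foldl_nil, ← hst, hpair]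
    have hw := pvWindow_step cs m N (by omega)
    have hle : pvVC ((cs.drop (N+1)).take (m+1)) ≤ pvVC cs := pvVC_le cs (N+1) (m+1)
    simp only [pvG]
    rw [pvIfArith, ← hw]
    exact ⟨rfl, max_le ih2 hle⟩

-- the port's inner fold is pvG over List.range
theorem pvInnerA_eq (cs : List Char) (l' : ℕ) (st : Int × Int) :
    pvInnerA cs (l' : Int) st
      = (List.range (((cs.length : Int) - (l' : Int) - 1).toNat)).foldl (pvG cs l') st := by
  unfold pvInnerA
  rw [PySem.List.pyRange_one, List.foldl_map]
  congr 1
  funext st k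
  have h1 : (1 : Int) + (k : Int) - 1 = ((k : ℕ) : Int) := by omega
  have h2 : (1 : Int) + (k : Int) + (l' : Int) - 1 = ((k + l' : ℕ) : Int) := by omega
  simp only [h1, h2, PySem.List.pyGetD_natCast, pvG, List.getD]
  rfl

theorem pvF_le (cs : List Char) (l' : ℕ) (hl : 1 ≤ l') (hls : l' ≤ cs.length)
    (mx : Int) (hmx : mx ≤ pvVC cs) : pvF cs mx (l' : Int) ≤ pvVC cs := by
  obtain ⟨m, rfl⟩ : ∃ m, l' = m + 1 := ⟨l' - 1, by omega⟩
  unfold pvF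
  simp only [pvInnerA_eq]
  have hsl : PySem.List.slice cs none (some ((m+1 : ℕ) : Int)) = cs.take (m+1) :=
    PySem.List.slice_to_natCast cs (m+1)
  simp only [hsl, pvCountVowels_eq]
  set N := (((cs.length : Int) - ((m+1 : ℕ) : Int) - 1).toNat) with hNdef
  have hN : N + (m+1) ≤ cs.length := by simp only [hNdef]; omega
  have hmx' : max mx (pvVC (cs.take (m+1))) ≤ pvVC cs :=
    max_le hmx (by simpa using pvVC_le cs 0 (m+1))
  exact (pvInner cs m N hN _ hmx').2

theorem pvFold_le (cs : List Char) :
    ∀ (xs : List Int), (∀ l ∈ xs, ∃ l' : ℕ, l = (l' : Int) ∧ 1 ≤ l' ∧ l' ≤ cs.length) →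
    ∀ mx : Int, mx ≤ pvVC cs → xs.foldl (pvF cs) mx ≤ pvVC cs := by
  intro xs
  induction xs with
  | nil => intro _ mx hmx; simpa using hmx
  | cons x t ih =>
    intro hmem mx hmx
    obtain ⟨l', rfl, h1, h2⟩ := hmem x (by simp)
    exact ih (fun l hl => hmem l (by simp [hl])) _ (pvF_le cs l' h1 h2 mx hmx)

-- the last pass (l = size) computes the vowel count of the whole string
theorem pvF_last (cs : List Char) (mx : Int) (hmx : mx ≤ pvVC cs) :
    pvF cs mx ((cs.length : ℕ) : Int) = pvVC cs := by
  unfold pvF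
  have hsl : PySem.List.slice cs none (some ((cs.length : ℕ) : Int)) = cs.take cs.length :=
    PySem.List.slice_to_natCast cs cs.length
  simp [pvInnerA, hsl, pvCountVowels_eq, hmx]

theorem pvAlt_eq (s : String) : subStringWithVowels_alt s = pvVC s.toList := by
  unfold subStringWithVowels_alt pvVC
  rw [List.countP_eq_length_filter]
  have hc : ∀ c ∈ s.toList, (("aeiou".toList).contains c) = pvIsVowel c := by
    intro c _
    show (['a','e','i','o','u'].contains c) = pvIsVowel c
    simp only [List.contains_cons, List.contains_nil, pvIsVowel, Bool.or_false, Bool.or_assoc]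
  rw [List.filter_congr hc]

-- ===== VERDICT (by name: the statement is the Claim_ definition above) =====
theorem subStringWithVowels_spec : Claim_equal_subStringWithVowels := by
  intro s _
  unfold Spec_subStringWithVowels
  rw [pvA_eq_foldF, pvAlt_eq]
  set cs := s.toList with hcs
  rcases Nat.eq_zero_or_pos cs.length with h0 | hpos
  · have hnil : cs = [] := List.eq_nil_of_length_eq_zero h0
    have hr : PySem.List.pyRange 1 ((cs.length : Int) + 1) 1 = [] := by
      rw [hnil]; decide
    rw [hr, hnil]
    simp [pvVC]
  · have h1 : (1 : Int) ≤ (cs.length : Int) := by exact_mod_cast hpos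
    rw [PySem.List.pyRange_one_succ_right h1, List.foldl_append, List.foldl_cons, List.foldl_nil]
    have hle : (PySem.List.pyRange 1 (cs.length : Int) 1).foldl (pvF cs) 0 ≤ pvVC cs := by
      apply pvFold_le cs _ ?_ 0 (pvVC_nonneg cs)
      intro l hl
      rw [PySem.List.mem_pyRange_one] at hl
      exact ⟨l.toNat, by omega, by omega, by omega⟩
    exact pvF_last cs _ hle
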